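-- pv_equiv track=rewrite | github.com/NLPDev/Compare-CSV | predict/columns.py | create_F1_F2_cols
-- ===== SOURCE A (Python) =====
-- def create_F1_F2_cols(col_base_list, output='both'):
--     """
--     generates a list of F1 and F2 columns from col_base_list. Works with 'FM_*' columns.
--
--     :param col_base_list:
--     :param output: 'both', returns both F1 and F2 columns
--                     'F1', returns only F1 columns
--                     'F2', returns only F2 columns
--     :return:
--     """
--     F12_cols = []
--     for x in col_base_list:
--         pref = x[:3]
--         if output == 'both':
--             if pref =='FM_':
--                 F12_cols.append('FM_F1_'+ x[3:])
--                 F12_cols.append('FM_F2_' + x[3:])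
--             else:
--                 F12_cols.append('F1_' + x)
--                 F12_cols.append('F2_' + x)
--         elif output =='F1':
--             if pref =='FM_':
--                 F12_cols.append('FM_F1_'+ x[3:])
--             else:
--                 F12_cols.append('F1_' + x)
--         elif output =='F2':
--             if pref =='FM_':
--                 F12_cols.append('FM_F2_'+ x[3:])
--             else:
--                 F12_cols.append('F2_' + x)
--     return F12_cols
-- ===== SOURCE B (Python) =====
-- def create_F1_F2_cols(col_base_list, output='both'):
--     """Table-driven rewrite: a label table replaces the branch-per-output duplication."""
--     labels = {'both': ['F1', 'F2'], 'F1': ['F1'], 'F2': ['F2']}.get(output, [])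
--     cols = []
--     for x in col_base_list:
--         for lbl in labels:
--             if x[:3] == 'FM_':
--                 cols.append('FM_' + lbl + '_' + x[3:])
--             else:
--                 cols.append(lbl + '_' + x)
--     return cols
-- ===== Notes on version B (the rewrite author's own statement) =====
-- stated objective: simpler
-- what changed: A's three-way output branch with duplicated append code is replaced by a lookup table mapping output to a label list and a single inner loop over the labels; unknown outputs fall out as the empty label list.
import Mathlib
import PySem

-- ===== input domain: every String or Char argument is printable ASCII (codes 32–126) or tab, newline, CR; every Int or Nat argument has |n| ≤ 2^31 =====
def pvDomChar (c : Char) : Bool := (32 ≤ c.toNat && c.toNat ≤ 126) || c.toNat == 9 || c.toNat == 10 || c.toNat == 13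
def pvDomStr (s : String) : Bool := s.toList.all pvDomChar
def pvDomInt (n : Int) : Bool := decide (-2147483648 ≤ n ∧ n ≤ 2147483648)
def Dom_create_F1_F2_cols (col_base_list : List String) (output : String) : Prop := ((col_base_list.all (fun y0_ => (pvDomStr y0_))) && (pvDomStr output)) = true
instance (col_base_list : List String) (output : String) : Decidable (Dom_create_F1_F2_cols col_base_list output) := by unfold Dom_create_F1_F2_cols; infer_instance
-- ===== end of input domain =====

-- B replaces A's branch-per-output duplication by a label lookup table and one inner loop (objective: simpler).

-- Python '+' on strings, kernel-transparent (exact: concatenation of code points)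
def pyStrAdd (a b : String) : String := String.ofList (a.toList ++ b.toList)

-- ===== PORT A =====
def create_F1_F2_cols (col_base_list : List String) (output : String) : List String :=
  col_base_list.foldl (fun F12_cols x =>
    let pref := PySem.Str.slice x none (some 3)
    if output = "both" then
      if pref = "FM_" then
        (F12_cols ++ [pyStrAdd "FM_F1_" (PySem.Str.slice x (some 3) none)])
          ++ [pyStrAdd "FM_F2_" (PySem.Str.slice x (some 3) none)]
      else
        (F12_cols ++ [pyStrAdd "F1_" x]) ++ [pyStrAdd "F2_" x]
    else if output = "F1" then
      if pref = "FM_" then F12_cols ++ [pyStrAdd "FM_F1_" (PySem.Str.slice x (some 3) none)]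
      else F12_cols ++ [pyStrAdd "F1_" x]
    else if output = "F2" then
      if pref = "FM_" then F12_cols ++ [pyStrAdd "FM_F2_" (PySem.Str.slice x (some 3) none)]
      else F12_cols ++ [pyStrAdd "F2_" x]
    else F12_cols) []

-- ===== PORT B =====
def create_F1_F2_cols_alt (col_base_list : List String) (output : String) : List String :=
  let labels : List String :=
    (PySem.Dict.ofList [("both", ["F1", "F2"]), ("F1", ["F1"]), ("F2", ["F2"])]).getD output []
  col_base_list.foldl (fun cols x =>
    labels.foldl (fun cols lbl =>
      if PySem.Str.slice x none (some 3) = "FM_" then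
        cols ++ [pyStrAdd (pyStrAdd (pyStrAdd "FM_" lbl) "_") (PySem.Str.slice x (some 3) none)]
      else
        cols ++ [pyStrAdd (pyStrAdd lbl "_") x]) cols) []

-- ===== PRECONDITION & SPEC =====
def Spec_create_F1_F2_cols (col_base_list : List String) (output : String) (out : List String) : Prop := out = create_F1_F2_cols_alt col_base_list output
instance (col_base_list : List String) (output : String) (out : List String) : Decidable (Spec_create_F1_F2_cols col_base_list output out) := by unfold Spec_create_F1_F2_cols; infer_instance

-- ===== CLAIM (what is proved, stated in full; the proofs are below) =====
def Claim_equal_create_F1_F2_cols : Prop := ∀ (col_base_list : List String) (output : String), Dom_create_F1_F2_cols col_base_list output → Spec_create_F1_F2_cols col_base_list output (create_F1_F2_cols col_base_list output)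

-- ===== LEMMAS AND PROOFS =====

lemma pvCat_FM_F1 : pyStrAdd (pyStrAdd "FM_" "F1") "_" = "FM_F1_" := rfl
lemma pvCat_FM_F2 : pyStrAdd (pyStrAdd "FM_" "F2") "_" = "FM_F2_" := rfl
lemma pvCat_F1 : pyStrAdd "F1" "_" = "F1_" := rfl
lemma pvCat_F2 : pyStrAdd "F2" "_" = "F2_" := rfl

lemma pvLabels_other (output : String) (h1 : output ≠ "both") (h2 : output ≠ "F1")
    (h3 : output ≠ "F2") :
    (PySem.Dict.ofList [("both", ["F1", "F2"]), ("F1", ["F1"]), ("F2", ["F2"])]).getD output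
      ([] : List String) = [] := by
  have hmk : (PySem.Dict.ofList [("both", ["F1", "F2"]), ("F1", ["F1"]), ("F2", ["F2"])]
      : PySem.Dict String (List String))
      = PySem.Dict.mk [("both", ["F1", "F2"]), ("F1", ["F1"]), ("F2", ["F2"])] := rfl
  rw [hmk, PySem.Dict.getD_eq_get?_getD]
  simp [Ne.symm h1, Ne.symm h2, Ne.symm h3, PySem.Dict.get?]

-- ===== VERDICT (by name: the statement is the Claim_ definition above) =====
theorem create_F1_F2_cols_spec : Claim_equal_create_F1_F2_cols := by
  intro cbl output _
  show create_F1_F2_cols cbl output = create_F1_F2_cols_alt cbl output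
  unfold create_F1_F2_cols create_F1_F2_cols_alt
  by_cases h1 : output = "both"
  · subst h1
    have hl : (PySem.Dict.ofList [("both", ["F1", "F2"]), ("F1", ["F1"]), ("F2", ["F2"])]).getD
        "both" ([] : List String) = ["F1", "F2"] := rfl
    rw [hl]
    refine PySem.List.foldl_congr_mem _ _ _ _ (fun acc x _ => ?_)
    by_cases hp : PySem.Str.slice x none (some 3) = "FM_" <;>
      simp [List.foldl, hp, pvCat_FM_F1, pvCat_FM_F2, pvCat_F1, pvCat_F2]
  · by_cases h2 : output = "F1"
    · subst h2
      simp only [if_neg h1]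
      have hl : (PySem.Dict.ofList [("both", ["F1", "F2"]), ("F1", ["F1"]), ("F2", ["F2"])]).getD
          "F1" ([] : List String) = ["F1"] := rfl
      rw [hl]
      refine PySem.List.foldl_congr_mem _ _ _ _ (fun acc x _ => ?_)
      by_cases hp : PySem.Str.slice x none (some 3) = "FM_" <;>
        simp [List.foldl, hp, pvCat_FM_F1, pvCat_F1]
    · by_cases h3 : output = "F2"
      · subst h3
        simp only [if_neg h1, if_neg h2]
        have hl : (PySem.Dict.ofList [("both", ["F1", "F2"]), ("F1", ["F1"]), ("F2", ["F2"])]).getD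
            "F2" ([] : List String) = ["F2"] := rfl
        rw [hl]
        refine PySem.List.foldl_congr_mem _ _ _ _ (fun acc x _ => ?_)
        by_cases hp : PySem.Str.slice x none (some 3) = "FM_" <;>
          simp [List.foldl, hp, pvCat_FM_F2, pvCat_F2]
      · simp only [if_neg h1, if_neg h2, if_neg h3, pvLabels_other output h1 h2 h3, List.foldl_nil]
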